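-- pv_equiv track=rewrite | github.com/WallerTsai/OJ-Solution | leetcode-py/前缀/前后缀分解/No3738.py | longestSubarray
-- ===== SOURCE A (Python) =====
-- from math import inf
-- from typing import List
--
-- def longestSubarray(nums: List[int]) -> int:
--     n = len(nums)
--
--     # 添加哨兵元素 -INF 和 +INF，这样就不用处理下标越界的情况
--     nums = [-inf] + nums + [inf]
--
--     # f[i]：以下标 i 为结尾的不降子数组长度
--     f = [0] * (n + 2)
--     f[0] = 0
--     for i in range(1, n + 1):
--         if nums[i] >= nums[i - 1]:
--             f[i] = f[i - 1] + 1
--         else: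
--             f[i] = 1
--
--     # g[i]：以下标 i 为开头的不降子数组长度
--     g = [0] * (n + 2)
--     g[n + 1] = 0
--     for i in range(n, 0, -1):
--         if nums[i] <= nums[i + 1]:
--             g[i] = g[i + 1] + 1
--         else:
--             g[i] = 1
--
--     ans = 0
--     for i in range(1, n + 1):
--         # 前后可以连接
--         if nums[i - 1] <= nums[i + 1]:
--             ans = max(ans, f[i - 1] + g[i + 1] + 1)
--         else:
--             ans = max(ans, f[i - 1] + 1, g[i + 1] + 1)
--     return ans
-- ===== SOURCE B (Python) =====
-- def longestSubarray(nums):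
--     # One forward pass, O(1) extra space: streaming DP instead of
--     # sentinel-padded prefix/suffix arrays.
--     ans = 0
--     keep_prev = keep_pprev = dp = 0   # runs ending at prev / pprev; dp = best
--     prev = pprev = None               # window ending at kept prev with one deletion
--     for x in nums:
--         cand = keep_prev + 1                      # delete x itself
--         if prev is not None:
--             d = 2                                 # delete prev, window = [prev, x]
--             if x >= prev:
--                 d = max(d, dp + 1)                # extend a prior deletion window
--             if pprev is None or x >= pprev:
--                 d = max(d, keep_pprev + 2)        # delete prev and reconnect
--             dp = d
--             cand = max(cand, dp)
--         ans = max(ans, cand)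
--         keep = keep_prev + 1 if (prev is None or x >= prev) else 1
--         keep_pprev, keep_prev = keep_prev, keep
--         pprev, prev = prev, x
--     return ans
-- ===== Notes on version B (the rewrite author's own statement) =====
-- stated objective: alternative
-- what changed: Replaced A's sentinel-padded three-pass prefix/suffix-array decomposition by a single forward streaming DP that keeps O(1) state: the current non-decreasing run length and the best one-deletion window ending at the kept current element.
import Mathlib
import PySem

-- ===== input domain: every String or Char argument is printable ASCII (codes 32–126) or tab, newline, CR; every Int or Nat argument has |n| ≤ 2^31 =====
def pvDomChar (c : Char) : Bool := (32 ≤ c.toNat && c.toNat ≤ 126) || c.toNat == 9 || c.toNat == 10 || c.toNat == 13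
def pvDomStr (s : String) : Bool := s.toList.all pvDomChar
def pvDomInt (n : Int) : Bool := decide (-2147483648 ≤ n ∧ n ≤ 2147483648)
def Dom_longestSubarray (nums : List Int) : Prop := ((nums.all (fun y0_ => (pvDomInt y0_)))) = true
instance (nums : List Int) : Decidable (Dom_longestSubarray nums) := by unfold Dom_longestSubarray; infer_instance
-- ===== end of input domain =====

-- B replaces A's sentinel-padded three-pass prefix/suffix-array decomposition by a
-- single forward streaming DP with O(1) state (objective: alternative; not measured faster).

-- ===== PORT A =====
-- A pads nums with the float sentinels -inf/+inf, used only in comparisons; XInt is the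
-- exact extended-integer order, so the port is exact on integer inputs.
inductive XInt where
  | ninf : XInt
  | fin : Int → XInt
  | pinf : XInt
deriving DecidableEq, Repr
def XInt.le : XInt → XInt → Bool
  | .ninf, _ => true
  | _, .pinf => true
  | .fin a, .fin b => a ≤ b
  | .pinf, _ => false
  | .fin _, .ninf => false
def aPad (nums : List Int) : List XInt := [XInt.ninf] ++ nums.map XInt.fin ++ [XInt.pinf]
def aIdx (nums : List Int) (i : Int) : XInt := PySem.List.pyGetD (aPad nums) i XInt.ninf

def aFStep (nums : List Int) (f : Int → Int) (i : Int) : Int → Int :=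
  if XInt.le (aIdx nums (i - 1)) (aIdx nums i) then
    fun j => if j = i then f (i - 1) + 1 else f j
  else
    fun j => if j = i then 1 else f j

def aGStep (nums : List Int) (g : Int → Int) (i : Int) : Int → Int :=
  if XInt.le (aIdx nums i) (aIdx nums (i + 1)) then
    fun j => if j = i then g (i + 1) + 1 else g j
  else
    fun j => if j = i then 1 else g j

def aAnsStep (nums : List Int) (f g : Int → Int) (ans i : Int) : Int :=
  if XInt.le (aIdx nums (i - 1)) (aIdx nums (i + 1)) then
    max ans (f (i - 1) + g (i + 1) + 1)
  else
    max (max ans (f (i - 1) + 1)) (g (i + 1) + 1)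

def longestSubarray (nums : List Int) : Int :=
  let n : Int := nums.length
  let f : Int → Int := (PySem.List.pyRange 1 (n + 1) 1).foldl (aFStep nums) (fun _ => 0)
  let g : Int → Int := (PySem.List.pyRange n 0 (-1)).foldl (aGStep nums) (fun _ => 0)
  (PySem.List.pyRange 1 (n + 1) 1).foldl (aAnsStep nums f g) 0

-- ===== PORT B =====
-- state = (ans, keep_pprev, keep_prev, dp, pprev, prev): exactly Source B's loop body
def bStep (s : Int × Int × Int × Int × Option Int × Option Int) (x : Int) :
    Int × Int × Int × Int × Option Int × Option Int :=
  let (ans, kpp, kp, dp, pprev, prev) := s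
  let cand := kp + 1
  let (dp, cand) :=
    match prev with
    | none => (dp, cand)
    | some p =>
      let d : Int := 2
      let d := if p ≤ x then max d (dp + 1) else d
      let d :=
        match pprev with
        | none => max d (kpp + 2)
        | some pp => if pp ≤ x then max d (kpp + 2) else d
      (d, max cand d)
  let ans := max ans cand
  let keep :=
    match prev with
    | none => kp + 1
    | some p => if p ≤ x then kp + 1 else 1
  (ans, kp, keep, dp, prev, some x)

def longestSubarray_alt (nums : List Int) : Int :=
  (nums.foldl bStep ((0 : Int), (0 : Int), (0 : Int), (0 : Int),
    (none : Option Int), (none : Option Int))).1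

-- ===== PRECONDITION & SPEC =====
def Spec_longestSubarray (nums : List Int) (out : Int) : Prop := out = longestSubarray_alt nums
instance (nums : List Int) (out : Int) : Decidable (Spec_longestSubarray nums out) := by unfold Spec_longestSubarray; infer_instance

-- ===== CLAIM (what is proved, stated in full; the proofs are below) =====
def Claim_equal_longestSubarray : Prop := ∀ (nums : List Int), Dom_longestSubarray nums → Spec_longestSubarray nums (longestSubarray nums)

-- ===== LEMMAS AND PROOFS =====
-- 1-based value accessor: yv l i = l[i-1] (used only for 1 ≤ i ≤ l.length)
def yv (l : List Int) (i : ℕ) : Int := l.getD (i - 1) 0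

-- f[i] of A, 1-based (fA l 0 = 0 is the sentinel entry f[0])
def fA (l : List Int) : ℕ → Int
  | 0 => 0
  | i + 1 => if i = 0 then 1 else if yv l i ≤ yv l (i + 1) then fA l i + 1 else 1

-- g[i] of A, 1-based; 0 outside 1..n
def gA (l : List Int) (i : ℕ) : Int :=
  if l.length < i ∨ i = 0 then 0
  else if i = l.length then 1
  else if yv l i ≤ yv l (i + 1) then gA l (i + 1) + 1 else 1
termination_by l.length + 1 - i
decreasing_by omega

def gAe (l : List Int) (j : Int) : Int := gA l j.toNat

def connb (l : List Int) (i : ℕ) : Bool :=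
  i == 1 || i == l.length || decide (yv l (i - 1) ≤ yv l (i + 1))

def cA (l : List Int) (i : ℕ) : Int :=
  if connb l i then fA l (i - 1) + gA l (i + 1) + 1
  else max (fA l (i - 1) + 1) (gA l (i + 1) + 1)

def ansA (l : List Int) (m : ℕ) : Int :=
  (List.range m).foldl (fun a k => max a (cA l (k + 1))) 0

def Dv (l : List Int) : ℕ → Int
  | 0 => 0
  | 1 => 0
  | i + 2 =>
    let d : Int := 2
    let d := if yv l (i + 1) ≤ yv l (i + 2) then max d (Dv l (i + 1) + 1) else d
    if i = 0 ∨ yv l i ≤ yv l (i + 2) then max d (fA l i + 2) else d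

def cB (l : List Int) (i : ℕ) : Int :=
  if i ≤ 1 then fA l (i - 1) + 1 else max (fA l (i - 1) + 1) (Dv l i)

def ansB (l : List Int) (m : ℕ) : Int :=
  (List.range m).foldl (fun a k => max a (cB l (k + 1))) 0

theorem aIdx_nat (l : List Int) (i : ℕ) (h : i ≤ l.length + 1) :
    aIdx l (i : Int) = (if i = 0 then XInt.ninf else if i = l.length + 1 then XInt.pinf
      else XInt.fin (yv l i)) := by
  rw [aIdx, PySem.List.pyGetD_natCast]
  match i with
  | 0 => simp [aPad]
  | (j + 1) =>
    have hj : j ≤ l.length := by omega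
    by_cases hje : j = l.length
    · subst hje
      simp [aPad, List.getD_append_right, List.length_map]
    · have hjl : j < l.length := by omega
      simp only [aPad, List.cons_append, List.getD_cons_succ]
      rw [List.getD_append _ _ _ _ (by simpa using hjl)]
      simp [yv, List.getD_eq_getElem?_getD, List.getElem?_map, List.getElem?_eq_getElem hjl,
        if_neg (by omega : ¬ j + 1 = 0), if_neg (by omega : ¬ j + 1 = l.length + 1)]
      omega

theorem aIdx_zero (l : List Int) : aIdx l 0 = XInt.ninf := by
  simpa using aIdx_nat l 0 (by omega)

theorem aIdx_top (l : List Int) : aIdx l ((l.length : Int) + 1) = XInt.pinf := by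
  have := aIdx_nat l (l.length + 1) (by omega)
  simpa using this

theorem aIdx_fin (l : List Int) (i : ℕ) (h1 : 1 ≤ i) (h2 : i ≤ l.length) :
    aIdx l (i : Int) = XInt.fin (yv l i) := by
  rw [aIdx_nat l i (by omega), if_neg (by omega), if_neg (by omega)]

theorem ffold_char (l : List Int) : ∀ (m : ℕ), m ≤ l.length → ∀ j : Int,
    ((List.range m).foldl (fun f (k : ℕ) => aFStep l f (1 + (k : Int))) (fun _ => 0)) j
      = if 1 ≤ j ∧ j ≤ (m : Int) then fA l j.toNat else 0 := by
  intro m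
  induction m with
  | zero => intro _ j; simp only [List.range_zero, List.foldl_nil]; rw [if_neg (by omega)]
  | succ m ih =>
    intro h j
    rw [List.range_succ, List.foldl_append, List.foldl_cons, List.foldl_nil]
    have e1 : (1 : Int) + (m : Int) - 1 = (m : Int) := by omega
    have e2 : (1 : Int) + (m : Int) = ((m + 1 : ℕ) : Int) := by push_cast; omega
    have hcond : XInt.le (aIdx l ((1 : Int) + (m : Int) - 1)) (aIdx l ((1 : Int) + (m : Int)))
        = (if m = 0 then true else decide (yv l m ≤ yv l (m + 1))) := by
      rw [e1, e2]
      match m with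
      | 0 => rw [show ((0:ℕ) : Int) = (0 : Int) by norm_num, aIdx_zero,
              aIdx_fin l 1 (by omega) (by omega)]; simp [XInt.le]
      | (t + 1) =>
        rw [aIdx_fin l (t + 1) (by omega) (by omega), aIdx_fin l (t + 2) (by omega) (by omega)]
        simp [XInt.le]
    rw [aFStep, hcond]
    have hfA : fA l (m + 1) = if m = 0 then 1 else if yv l m ≤ yv l (m + 1) then fA l m + 1 else 1 := by
      simp [fA]
    by_cases hj : j = (1 : Int) + (m : Int)
    · subst hj
      have ht : ((1 : Int) + (m : Int)).toNat = m + 1 := by omega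
      have hprev : ((List.range m).foldl (fun f (k : ℕ) => aFStep l f (1 + (k : Int))) (fun _ => 0))
          ((m : Int)) = fA l m := by
        rw [ih (by omega)]
        match m with
        | 0 => rw [if_neg (by omega), show fA l 0 = 0 from rfl]
        | (t + 1) => rw [if_pos (by constructor <;> omega)]; norm_num
      have hrhs : (if 1 ≤ (1 : Int) + (m : Int) ∧ (1 : Int) + (m : Int) ≤ ((m + 1 : ℕ) : Int)
          then fA l ((1 : Int) + (m : Int)).toNat else 0) = fA l (m + 1) := by
        rw [if_pos (by constructor <;> push_cast <;> omega), ht]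
      rw [hrhs, hfA]
      by_cases hm0 : m = 0
      · subst hm0
        simp [e1, hprev, fA]
      · rw [if_neg hm0, if_neg hm0]
        by_cases hyy : yv l m ≤ yv l (m + 1)
        · simp [hyy, e1, hprev]
        · simp [hyy, e1, hprev]
    · have : ((List.range m).foldl (fun f (k : ℕ) => aFStep l f (1 + (k : Int))) (fun _ => 0)) j
          = if 1 ≤ j ∧ j ≤ (m : Int) then fA l j.toNat else 0 := ih (by omega) j
      split_ifs with h1 <;> simp only [if_neg hj] <;> rw [this] <;> split_ifs with h4 <;>
        first | rfl | omega

theorem gA_zero_of_gt (l : List Int) (i : ℕ) (h : l.length < i) : gA l i = 0 := by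
  rw [gA, if_pos (Or.inl h)]

theorem gfold_char (l : List Int) : ∀ (m : ℕ), m ≤ l.length → ∀ (g0 : Int → Int),
    (∀ j : Int, g0 j = if (m : Int) < j then gAe l j else 0) →
    ∀ j : Int, ((PySem.List.pyRange (m : Int) 0 (-1)).foldl (aGStep l) g0) j
      = if 0 < j then gAe l j else 0 := by
  intro m
  induction m with
  | zero =>
    intro _ g0 hg0 j
    rw [PySem.List.pyRange_neg_one_eq_nil (by norm_num), List.foldl_nil, hg0]
    norm_num
  | succ m ih =>
    intro h g0 hg0 j
    rw [show ((m + 1 : ℕ) : Int) = (m : Int) + 1 by push_cast; ring,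
      PySem.List.pyRange_neg_one_cons (by omega), List.foldl_cons,
      show (m : Int) + 1 - 1 = (m : Int) by ring]
    apply ih (by omega)
    intro j'
    by_cases hj : j' = (m : Int) + 1
    · subst hj
      rw [if_pos (by omega)]
      have hge : g0 ((m : Int) + 1 + 1) = gAe l ((m : Int) + 1 + 1) := by
        rw [hg0, if_pos (by push_cast; omega)]
      have hgAe : gAe l ((m : Int) + 1) = gA l (m + 1) := by
        show gA l ((m : Int) + 1).toNat = _
        norm_num
      have hgAe2 : gAe l ((m : Int) + 1 + 1) = gA l (m + 2) := by
        show gA l ((m : Int) + 1 + 1).toNat = _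
        rw [show ((m : Int) + 1 + 1).toNat = m + 2 by omega]
      rw [hgAe, aGStep]
      by_cases hlast : m + 1 = l.length
      · have hle : XInt.le (aIdx l ((m : Int) + 1)) (aIdx l ((m : Int) + 1 + 1)) = true := by
          rw [show (m : Int) + 1 + 1 = (l.length : Int) + 1 by omega, aIdx_top]
          cases aIdx l ((m : Int) + 1) <;> rfl
        simp only [hle, if_true, if_pos rfl]
        rw [hge, hgAe2, show gA l (m + 2) = 0 from gA_zero_of_gt l (m + 2) (by omega)]
        rw [gA, if_neg (by omega), if_pos hlast]
        norm_num
      · have hm2 : m + 2 ≤ l.length := by omega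
        have hle : XInt.le (aIdx l ((m : Int) + 1)) (aIdx l ((m : Int) + 1 + 1))
            = decide (yv l (m + 1) ≤ yv l (m + 2)) := by
          rw [show ((m : Int) + 1) = ((m + 1 : ℕ) : Int) by push_cast; ring,
            show ((m + 1 : ℕ) : Int) + 1 = ((m + 2 : ℕ) : Int) by push_cast; ring,
            aIdx_fin l (m + 1) (by omega) (by omega), aIdx_fin l (m + 2) (by omega) hm2]
          rfl
        rw [hle]
        have hrec : gA l (m + 1) = if yv l (m + 1) ≤ yv l (m + 2) then gA l (m + 2) + 1 else 1 := by
          rw [gA, if_neg (by omega), if_neg hlast]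
        by_cases hyy : yv l (m + 1) ≤ yv l (m + 2)
        · simp only [hyy, decide_true, if_true, if_pos rfl]
          rw [hge, hgAe2, hrec, if_pos hyy]
        · simp only [hyy, decide_false, Bool.false_eq_true, if_false]
          rw [hrec, if_neg hyy, if_pos trivial]

    · have hj2 : ((m : Int) + 1 < j') ↔ ((m : Int) < j') := by
        constructor <;> intro <;> omega
      have : aGStep l g0 ((m : Int) + 1) j' = g0 j' := by
        rw [aGStep]
        split_ifs <;> simp [hj]
      rw [this, hg0, show ((m + 1 : ℕ) : Int) = (m : Int) + 1 by push_cast; ring]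
      split_ifs <;> first | rfl | omega

theorem ansfold_char (l : List Int) (fF gF : Int → Int)
    (hf : ∀ j : Int, fF j = if 1 ≤ j ∧ j ≤ (l.length : Int) then fA l j.toNat else 0)
    (hg : ∀ j : Int, gF j = if 0 < j then gAe l j else 0) :
    ∀ (m : ℕ), m ≤ l.length → ∀ a : Int,
      ((List.range m).foldl (fun acc (k : ℕ) => aAnsStep l fF gF acc (1 + (k : Int))) a)
        = (List.range m).foldl (fun acc k => max acc (cA l (k + 1))) a := by
  intro m
  induction m with
  | zero => intro _ a; rfl
  | succ m ih =>
    intro h a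
    rw [List.range_succ, List.foldl_append, List.foldl_append,
      List.foldl_cons, List.foldl_cons, List.foldl_nil, List.foldl_nil, ih (by omega)]
    set acc := (List.range m).foldl (fun acc k => max acc (cA l (k + 1))) a with hacc
    -- the element processed is i = 1 + m
    have e1 : (1 : Int) + (m : Int) - 1 = (m : Int) := by ring
    have e2 : (1 : Int) + (m : Int) + 1 = ((m + 2 : ℕ) : Int) := by push_cast; ring
    have hfv : fF ((1 : Int) + (m : Int) - 1) = fA l m := by
      rw [e1, hf]
      match m with
      | 0 => rw [if_neg (by omega), show fA l 0 = 0 from rfl]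
      | (t + 1) => rw [if_pos (by constructor <;> omega)]; norm_num
    have hgv : gF ((1 : Int) + (m : Int) + 1) = gA l (m + 2) := by
      rw [hg, if_pos (by omega)]
      show gA l _ = _
      rw [show ((1 : Int) + (m : Int) + 1).toNat = m + 2 by omega]
    have hcond : XInt.le (aIdx l ((1 : Int) + (m : Int) - 1)) (aIdx l ((1 : Int) + (m : Int) + 1))
        = connb l (m + 1) := by
      rw [e1, e2]
      match m with
      | 0 =>
        rw [show ((0 : ℕ) : Int) = (0 : Int) by norm_num, aIdx_zero]
        have : connb l 1 = true := by simp [connb]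
        rw [this]
        rfl
      | (t + 1) =>
        by_cases hlast : t + 2 = l.length
        · rw [show ((t + 1 + 2 : ℕ) : Int) = (l.length : Int) + 1 by omega, aIdx_top]
          have : connb l (t + 2) = true := by simp [connb, hlast]
          rw [this]
          cases aIdx l ((t + 1 : ℕ) : Int) <;> rfl
        · rw [aIdx_fin l (t + 1) (by omega) (by omega), aIdx_fin l (t + 3) (by omega) (by omega)]
          have : connb l (t + 2) = decide (yv l (t + 1) ≤ yv l (t + 3)) := by
            simp only [connb, beq_iff_eq]
            rw [show ((t + 2 == 1) : Bool) = false by simp, show ((t + 2 == l.length) : Bool) = false by simp [hlast]]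
            simp only [Bool.false_or]
            norm_num
          rw [this]
          rfl
    rw [aAnsStep, hcond, hfv, hgv]
    have hca : cA l (m + 1) = if connb l (m + 1) then fA l m + gA l (m + 2) + 1
        else max (fA l m + 1) (gA l (m + 2) + 1) := by
      simp [cA]
    rw [hca]
    by_cases hc : connb l (m + 1)
    · rw [if_pos hc, if_pos (by simp [hc])]
    · rw [if_neg (by simp [hc]), if_neg hc, max_assoc]

theorem A_char (l : List Int) : longestSubarray l = ansA l l.length := by
  unfold longestSubarray
  simp only []
  have hr : PySem.List.pyRange 1 ((l.length : Int) + 1) 1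
      = (List.range l.length).map (fun k : ℕ => 1 + (k : Int)) := by
    apply List.ext_getElem
    · rw [PySem.List.length_pyRange_one]
      simp
    · intro k h1 h2
      rw [PySem.List.getElem_pyRange_one]
      simp [add_comm]
  rw [hr, List.foldl_map, List.foldl_map]
  have hfc := ffold_char l l.length (by omega)
  have hgc := gfold_char l l.length (by omega) (fun _ => 0) (by
    intro j
    split_ifs with hj
    · show (0 : Int) = gA l j.toNat
      rw [gA_zero_of_gt l j.toNat (by omega)]
    · rfl)
  rw [ansfold_char l _ _ hfc hgc l.length (by omega)]
  rfl

theorem ansB_succ (l : List Int) (m : ℕ) : ansB l (m + 1) = max (ansB l m) (cB l (m + 1)) := by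
  unfold ansB
  rw [List.range_succ, List.foldl_append]
  rfl

theorem stB_char (l : List Int) : ∀ (m : ℕ), m ≤ l.length →
    (l.take m).foldl bStep ((0 : Int), (0 : Int), (0 : Int), (0 : Int),
      (none : Option Int), (none : Option Int))
      = (ansB l m, fA l (m - 1), fA l m, Dv l m,
         (if 2 ≤ m then some (yv l (m - 1)) else none),
         (if 1 ≤ m then some (yv l m) else none)) := by
  intro m
  induction m with
  | zero => intro _; simp [ansB, fA, Dv]
  | succ m ih =>
    intro h
    have hm : m < l.length := by omega
    have hx : l.take (m + 1) = l.take m ++ [l[m]] := by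
      rw [List.take_add_one]
      simp [List.getElem?_eq_getElem hm]
    rw [hx, List.foldl_append, ih (by omega)]
    have hy : l[m] = yv l (m + 1) := by
      simp [yv, List.getD_eq_getElem?_getD, List.getElem?_eq_getElem hm]
    match m with
    | 0 =>
      simp [bStep, hy, ansB_succ, cB, fA, Dv]
    | 1 =>
      simp [bStep, hy, ansB_succ, cB, fA, Dv]
    | (t + 2) =>
      simp only [List.foldl_cons, List.foldl_nil, bStep, hy, ansB_succ]
      simp only [show t + 2 - 1 = t + 1 by omega, show t + 3 - 1 = t + 2 by omega,
        show (2:ℕ) ≤ t + 2 by omega, show (1:ℕ) ≤ t + 2 by omega,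
        show (2:ℕ) ≤ t + 3 by omega, show (1:ℕ) ≤ t + 3 by omega, if_true]
      have hcB : cB l (t + 3) = max (fA l (t + 2) + 1) (Dv l (t + 3)) := by simp [cB]
      have hDv : Dv l (t + 3) =
          (let d : Int := 2
           let d := if yv l (t + 2) ≤ yv l (t + 3) then max d (Dv l (t + 2) + 1) else d
           if t + 1 = 0 ∨ yv l (t + 1) ≤ yv l (t + 3) then max d (fA l (t + 1) + 2) else d) := by
        rfl
      have hfA : fA l (t + 3) = if yv l (t + 2) ≤ yv l (t + 3) then fA l (t + 2) + 1 else 1 := by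
        simp [fA]
      rw [hcB, hDv, hfA]
      simp

theorem B_char (l : List Int) : longestSubarray_alt l = ansB l l.length := by
  unfold longestSubarray_alt
  have h := stB_char l l.length (le_refl _)
  rw [List.take_length] at h
  rw [h]

-- generic running-max facts
theorem foldl_max_init_le (f : ℕ → Int) (m : ℕ) (a : Int) :
    a ≤ (List.range m).foldl (fun acc k => max acc (f k)) a := by
  induction m generalizing a with
  | zero => simp
  | succ m ih =>
    rw [List.range_succ, List.foldl_append, List.foldl_cons, List.foldl_nil]
    exact le_trans (ih a) (le_max_left _ _)

theorem foldl_max_elem_le (f : ℕ → Int) (m : ℕ) (a : Int) (k : ℕ) (hk : k < m) :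
    f k ≤ (List.range m).foldl (fun acc k => max acc (f k)) a := by
  induction m with
  | zero => omega
  | succ m ih =>
    rw [List.range_succ, List.foldl_append, List.foldl_cons, List.foldl_nil]
    by_cases hkm : k = m
    · subst hkm; exact le_max_right _ _
    · exact le_trans (ih (by omega)) (le_max_left _ _)

theorem foldl_max_le (f : ℕ → Int) (m : ℕ) (a K : Int) (ha : a ≤ K)
    (h : ∀ k < m, f k ≤ K) : (List.range m).foldl (fun acc k => max acc (f k)) a ≤ K := by
  induction m with
  | zero => simpa
  | succ m ih =>
    rw [List.range_succ, List.foldl_append, List.foldl_cons, List.foldl_nil]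
    exact max_le (ih (fun k hk => h k (by omega))) (h m (by omega))

-- basic bounds
theorem fA_nonneg (l : List Int) (i : ℕ) : 0 ≤ fA l i := by
  induction i with
  | zero => simp [fA]
  | succ i ih => rw [fA]; split_ifs <;> omega

theorem gA_nonneg (l : List Int) : ∀ (d i : ℕ), l.length + 1 - i ≤ d → 0 ≤ gA l i := by
  intro d
  induction d with
  | zero => intro i hi; rw [gA_zero_of_gt l i (by omega)]
  | succ d ih =>
    intro i hi
    rw [gA]
    split_ifs with h1 h2 h3
    · omega
    · omega
    · have := ih (i + 1) (by omega); omega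
    · omega

theorem gA_pos (l : List Int) : ∀ (d i : ℕ), l.length + 1 - i ≤ d → 1 ≤ i → i ≤ l.length → 1 ≤ gA l i := by
  intro d
  induction d with
  | zero => intro i h1 h2 h3; omega
  | succ d ih =>
    intro i h1 h2 h3
    rw [gA]
    rw [if_neg (by omega)]
    split_ifs with h4 h5
    · omega
    · have := ih (i + 1) (by omega) (by omega) (by omega); omega
    · omega

theorem gA_nonneg' (l : List Int) (i : ℕ) : 0 ≤ gA l i :=
  gA_nonneg l (l.length + 1) i (by omega)

theorem gA_pos' (l : List Int) (i : ℕ) (h1 : 1 ≤ i) (h2 : i ≤ l.length) : 1 ≤ gA l i :=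
  gA_pos l (l.length + 1) i (by omega) h1 h2

theorem gA_last (l : List Int) (h : 1 ≤ l.length) : gA l l.length = 1 := by
  rw [gA, if_neg (by omega), if_pos rfl]

theorem gA_step (l : List Int) (j : ℕ) (h1 : 1 ≤ j) (h2 : j < l.length)
    (hyy : yv l j ≤ yv l (j + 1)) : gA l j = gA l (j + 1) + 1 := by
  rw [gA, if_neg (by omega), if_neg (by omega), if_pos hyy]

theorem gA_one (l : List Int) (j : ℕ) (h1 : 1 ≤ j) (h2 : j < l.length)
    (hyy : ¬ yv l j ≤ yv l (j + 1)) : gA l j = 1 := by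
  rw [gA, if_neg (by omega), if_neg (by omega), if_neg hyy]

theorem Dv_ge_two (l : List Int) (t : ℕ) : 2 ≤ Dv l (t + 2) := by
  simp only [Dv]
  split_ifs <;> omega

theorem Dv_chain (l : List Int) (j : ℕ) (h1 : 1 ≤ j) (hyy : yv l j ≤ yv l (j + 1)) :
    Dv l j + 1 ≤ Dv l (j + 1) := by
  match j, h1 with
  | (t + 1), _ =>
    simp only [Dv]
    split_ifs <;> omega

theorem Dv_reconn (l : List Int) (i : ℕ) (h1 : 1 ≤ i)
    (h : i = 1 ∨ yv l (i - 1) ≤ yv l (i + 1)) : fA l (i - 1) + 2 ≤ Dv l (i + 1) := by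
  match i, h1 with
  | (t + 1), _ =>
    have h' : t = 0 ∨ yv l t ≤ yv l (t + 2) := by
      rcases h with h | h
      · left; omega
      · right; simpa using h
    simp only [Dv, show t + 1 - 1 = t by omega] at h ⊢
    rcases h' with h' | h' <;> split_ifs <;> simp_all <;> omega

theorem cB_ge_f (l : List Int) (i : ℕ) (h : 1 ≤ i) : fA l (i - 1) + 1 ≤ cB l i := by
  rw [cB]; split_ifs
  · omega
  · exact le_max_left _ _

theorem cB_ge_Dv (l : List Int) (i : ℕ) (h : 1 ≤ i) : Dv l i ≤ cB l i := by
  rw [cB]; split_ifs with h1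
  · have : i = 1 := by omega
    subst this
    have : Dv l 1 = 0 := rfl
    rw [this]
    have := fA_nonneg l (1 - 1)
    omega
  · exact le_max_right _ _

theorem cB_le_ansB (l : List Int) (i : ℕ) (h1 : 1 ≤ i) (h2 : i ≤ l.length) :
    cB l i ≤ ansB l l.length := by
  have := foldl_max_elem_le (fun k => cB l (k + 1)) l.length 0 (i - 1) (by omega)
  simpa [show i - 1 + 1 = i by omega] using this

theorem cA_le_ansA (l : List Int) (i : ℕ) (h1 : 1 ≤ i) (h2 : i ≤ l.length) :
    cA l i ≤ ansA l l.length := by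
  have := foldl_max_elem_le (fun k => cA l (k + 1)) l.length 0 (i - 1) (by omega)
  simpa [show i - 1 + 1 = i by omega] using this

theorem cA_ge_f (l : List Int) (i : ℕ) (h1 : 1 ≤ i) (h2 : i ≤ l.length) :
    fA l (i - 1) + 1 ≤ cA l i := by
  rw [cA]
  have := gA_nonneg' l (i + 1)
  split_ifs
  · omega
  · exact le_max_left _ _

theorem cA_ge_g (l : List Int) (i : ℕ) (h1 : 1 ≤ i) (h2 : i ≤ l.length) :
    gA l (i + 1) + 1 ≤ cA l i := by
  rw [cA]
  have := fA_nonneg l (i - 1)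
  split_ifs
  · omega
  · exact le_max_right _ _

theorem Dv_le_ansB (l : List Int) (j : ℕ) (h1 : 1 ≤ j) (h2 : j ≤ l.length) (v : Int)
    (hv : v ≤ Dv l j) : v ≤ ansB l l.length :=
  le_trans hv (le_trans (cB_ge_Dv l j h1) (cB_le_ansB l j h1 h2))

theorem chainB (l : List Int) : ∀ (d j : ℕ), l.length - j ≤ d → 1 ≤ j → j ≤ l.length →
    ∀ v : Int, v ≤ Dv l j → v + gA l j - 1 ≤ ansB l l.length := by
  intro d
  induction d with
  | zero =>
    intro j hd h1 h2 v hv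
    have hj : j = l.length := by omega
    subst hj
    rw [gA_last l (by omega)]
    have := Dv_le_ansB l l.length h1 h2 v hv
    omega
  | succ d ih =>
    intro j hd h1 h2 v hv
    by_cases hjl : j = l.length
    · subst hjl
      rw [gA_last l (by omega)]
      have := Dv_le_ansB l l.length h1 h2 v hv
      omega
    · by_cases hyy : yv l j ≤ yv l (j + 1)
      · rw [gA_step l j h1 (by omega) hyy]
        have hc := Dv_chain l j h1 hyy
        have := ih (j + 1) (by omega) (by omega) (by omega) (v + 1) (by omega)
        omega
      · rw [gA_one l j h1 (by omega) hyy]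
        have := Dv_le_ansB l j h1 h2 v hv
        omega

theorem chainA (l : List Int) : ∀ (t : ℕ), t + 2 ≤ l.length →
    Dv l (t + 2) + gA l (t + 2) - 1 ≤ ansA l l.length := by
  intro t
  induction t with
  | zero =>
    intro h
    have hF1 : gA l 2 + 1 ≤ ansA l l.length :=
      le_trans (cA_ge_g l 1 (by omega) (by omega)) (cA_le_ansA l 1 (by omega) (by omega))
    have hF3 : fA l 0 + gA l 2 + 1 ≤ ansA l l.length := by
      have hconn : connb l 1 = true := by simp [connb]
      have : cA l 1 = fA l 0 + gA l 2 + 1 := by rw [cA, if_pos hconn]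
      rw [← this]
      exact cA_le_ansA l 1 (by omega) (by omega)
    have hDv2 : Dv l (0 + 2) = 2 := by
      have h0 : fA l 0 = 0 := rfl
      have h1 : Dv l 1 = 0 := rfl
      simp only [Dv, h0, h1]
      split_ifs <;> simp
    rw [hDv2]
    have : gA l (0 + 2) = gA l 2 := by norm_num
    rw [this]
    omega
  | succ t ih =>
    intro h
    have hF1 : gA l (t + 3) + 1 ≤ ansA l l.length := by
      have := cA_ge_g l (t + 2) (by omega) (by omega)
      exact le_trans this (cA_le_ansA l (t + 2) (by omega) (by omega))
    -- ext: gA (t+2) = gA (t+3) + 1 under the run condition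
    have hext : yv l (t + 2) ≤ yv l (t + 3) → gA l (t + 2) = gA l (t + 3) + 1 :=
      fun hyy => gA_step l (t + 2) (by omega) (by omega) hyy
    have hih : Dv l (t + 2) + gA l (t + 2) - 1 ≤ ansA l l.length := ih (by omega)
    have hF3 : yv l (t + 1) ≤ yv l (t + 3) → fA l (t + 1) + gA l (t + 3) + 1 ≤ ansA l l.length := by
      intro hc
      have hc' : yv l (t + 2 - 1) ≤ yv l (t + 2 + 1) := by
        simpa using hc
      have hconn : connb l (t + 2) = true := by
        simp [connb, hc']
        right
        simpa using hc
      have : cA l (t + 2) = fA l (t + 1) + gA l (t + 3) + 1 := by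
        rw [cA, if_pos hconn]
        norm_num
      rw [← this]
      exact cA_le_ansA l (t + 2) (by omega) (by omega)
    show Dv l (t + 3) + gA l (t + 3) - 1 ≤ ansA l l.length
    have hDv3 : Dv l (t + 3) =
        (let d : Int := 2
         let d := if yv l (t + 2) ≤ yv l (t + 3) then max d (Dv l (t + 2) + 1) else d
         if t + 1 = 0 ∨ yv l (t + 1) ≤ yv l (t + 3) then max d (fA l (t + 1) + 2) else d) := rfl
    rw [hDv3]
    simp only []
    have hne : ¬ (t + 1 = 0) := by omega
    by_cases hyy : yv l (t + 2) ≤ yv l (t + 3) <;>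
      by_cases hcc : yv l (t + 1) ≤ yv l (t + 3)
    · rw [if_pos hyy, if_pos (Or.inr hcc)]
      have h1 := hext hyy
      have h2 := hF3 hcc
      omega
    · rw [if_pos hyy, if_neg (by simp only [hcc, or_false]; omega)]
      have h1 := hext hyy
      omega
    · rw [if_neg hyy, if_pos (Or.inr hcc)]
      have h2 := hF3 hcc
      omega
    · rw [if_neg hyy, if_neg (by simp only [hcc, or_false]; omega)]
      omega

theorem cB_le_ansA (l : List Int) (i : ℕ) (h1 : 1 ≤ i) (h2 : i ≤ l.length) :
    cB l i ≤ ansA l l.length := by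
  have hf := le_trans (cA_ge_f l i h1 h2) (cA_le_ansA l i h1 h2)
  rw [cB]
  split_ifs with hle
  · exact hf
  · apply max_le hf
    match i, hle with
    | (t + 2), _ =>
      have hg := gA_pos' l (t + 2) (by omega) h2
      have := chainA l t h2
      omega

theorem cA_le_ansB (l : List Int) (i : ℕ) (h1 : 1 ≤ i) (h2 : i ≤ l.length) :
    cA l i ≤ ansB l l.length := by
  have hf := le_trans (cB_ge_f l i h1) (cB_le_ansB l i h1 h2)
  by_cases hconn : connb l i = true
  · by_cases hil : i = l.length
    · subst hil
      rw [cA, if_pos hconn, gA_zero_of_gt l (l.length + 1) (by omega)]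
      omega
    · have hdis : i = 1 ∨ yv l (i - 1) ≤ yv l (i + 1) := by
        simp only [connb, Bool.or_eq_true, beq_iff_eq, decide_eq_true_eq] at hconn
        rcases hconn with (h | h) | h
        · exact Or.inl h
        · exact absurd h hil
        · exact Or.inr h
      have hD := Dv_reconn l i h1 hdis
      have hch := chainB l l.length (i + 1) (by omega) (by omega) (by omega)
        (fA l (i - 1) + 2) hD
      rw [cA, if_pos hconn]
      omega
  · rw [cA, if_neg hconn]
    apply max_le hf
    have h2d : 2 ≤ Dv l (i + 1) := by
      match i, h1 with
      | (t + 1), _ => exact Dv_ge_two l t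
    have hch := chainB l l.length (i + 1) (by omega) (by omega)
      (by
        have hne : i ≠ l.length := fun he => hconn (by simp [connb, he])
        omega)
      2 h2d
    omega

theorem ans_eq (l : List Int) : ansA l l.length = ansB l l.length := by
  apply le_antisymm
  · exact foldl_max_le _ _ _ _ (foldl_max_init_le (fun k => cB l (k + 1)) l.length 0)
      (fun k hk => cA_le_ansB l (k + 1) (by omega) (by omega))
  · exact foldl_max_le _ _ _ _ (foldl_max_init_le (fun k => cA l (k + 1)) l.length 0)
      (fun k hk => cB_le_ansA l (k + 1) (by omega) (by omega))

-- ===== VERDICT (by name: the statement is the Claim_ definition above) =====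
theorem longestSubarray_spec : Claim_equal_longestSubarray := by
  intro nums _
  unfold Spec_longestSubarray
  rw [A_char, B_char, ans_eq]
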